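-- pv_equiv track=rewrite | github.com/zeyad03/api-project | src/data/seed.py | _compute_career_stats
-- ===== SOURCE A (Python) =====
-- from collections import defaultdict
--
-- def _compute_career_stats(results: list[dict], active_driver_ids: set[str]) -> tuple[dict, dict, dict]:
--     """Compute career wins, podiums, and poles for active drivers."""
--     career_wins: dict[str, int] = defaultdict(int)
--     career_podiums: dict[str, int] = defaultdict(int)
--     career_poles: dict[str, int] = defaultdict(int)
--
--     for row in results:
--         driver_id = row["driverId"]
--         if driver_id not in active_driver_ids:
--             continue
--         if row["positionOrder"] == "1":
--             career_wins[driver_id] += 1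
--         if row["positionOrder"] in ("1", "2", "3"):
--             career_podiums[driver_id] += 1
--         if row["grid"] == "1":
--             career_poles[driver_id] += 1
--
--     return career_wins, career_podiums, career_poles
-- ===== SOURCE B (Python) =====
-- from collections import defaultdict, Counter
--
-- def _compute_career_stats(results: list[dict], active_driver_ids: set[str]) -> tuple[dict, dict, dict]:
--     """Compute career wins, podiums, and poles for active drivers."""
--     rows = [row for row in results if row["driverId"] in active_driver_ids]
--     wins = Counter(row["driverId"] for row in rows if row["positionOrder"] == "1")
--     podiums = Counter(row["driverId"] for row in rows if row["positionOrder"] in ("1", "2", "3"))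
--     poles = Counter(row["driverId"] for row in rows if row["grid"] == "1")
--     return defaultdict(int, wins), defaultdict(int, podiums), defaultdict(int, poles)
-- ===== Notes on version B (the rewrite author's own statement) =====
-- stated objective: simpler
-- what changed: Replaces the single loop threading three defaultdict accumulators with a filter of the active rows followed by three independent Counter passes (one per statistic), each wrapped back into a defaultdict(int).
import Mathlib
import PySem

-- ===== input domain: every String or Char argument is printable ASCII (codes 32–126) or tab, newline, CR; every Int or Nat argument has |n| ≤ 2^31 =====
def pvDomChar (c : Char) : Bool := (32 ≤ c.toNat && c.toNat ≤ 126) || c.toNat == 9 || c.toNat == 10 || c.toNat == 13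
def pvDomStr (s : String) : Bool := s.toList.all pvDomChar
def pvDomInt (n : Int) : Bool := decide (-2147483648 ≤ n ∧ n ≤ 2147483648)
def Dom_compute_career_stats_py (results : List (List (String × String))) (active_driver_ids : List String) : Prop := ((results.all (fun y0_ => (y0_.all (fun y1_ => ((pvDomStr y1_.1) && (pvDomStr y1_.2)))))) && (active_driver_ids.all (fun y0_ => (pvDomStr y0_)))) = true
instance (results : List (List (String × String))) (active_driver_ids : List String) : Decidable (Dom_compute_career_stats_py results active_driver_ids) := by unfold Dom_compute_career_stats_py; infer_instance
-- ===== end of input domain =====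

-- B replaces A's single three-accumulator loop with one active-row filter plus three
-- independent Counter passes (objective: simpler). Equivalence is about the return value.

-- row["k"] on an assoc-list row: first match; "" only reached outside Pre_ (KeyError in Python)
def pvRowGet (row : List (String × String)) (k : String) : String :=
  ((PySem.Dict.mk row).get? k).getD ""

-- ===== PORT A =====
-- literal transliteration of A's loop: one fold threading the three defaultdicts
def compute_career_stats_py (results : List (List (String × String))) (active_driver_ids : List String) : (List (String × Int)) × (List (String × Int)) × (List (String × Int)) :=
  let st := results.foldl
    (fun (st : PySem.Dict String Int × PySem.Dict String Int × PySem.Dict String Int) row =>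
      let driver_id := pvRowGet row "driverId"
      if driver_id ∈ active_driver_ids then
        let wins := if pvRowGet row "positionOrder" = "1"
          then st.1.modify driver_id 0 (· + 1) else st.1
        let podiums := if pvRowGet row "positionOrder" = "1" ∨ pvRowGet row "positionOrder" = "2" ∨ pvRowGet row "positionOrder" = "3"
          then st.2.1.modify driver_id 0 (· + 1) else st.2.1
        let poles := if pvRowGet row "grid" = "1"
          then st.2.2.modify driver_id 0 (· + 1) else st.2.2
        (wins, podiums, poles)
      else st)
    (PySem.Dict.empty, PySem.Dict.empty, PySem.Dict.empty)
  (st.1.items, st.2.1.items, st.2.2.items)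

-- ===== PORT B =====
-- literal transliteration of B: filter active rows, then three Counter passes
def compute_career_stats_py_alt (results : List (List (String × String))) (active_driver_ids : List String) : (List (String × Int)) × (List (String × Int)) × (List (String × Int)) :=
  let rows := results.filter (fun row => pvRowGet row "driverId" ∈ active_driver_ids)
  let wins := PySem.Dict.counter
    ((rows.filter (fun row => pvRowGet row "positionOrder" = "1")).map (fun row => pvRowGet row "driverId"))
  let podiums := PySem.Dict.counter
    ((rows.filter (fun row => pvRowGet row "positionOrder" = "1" ∨ pvRowGet row "positionOrder" = "2" ∨ pvRowGet row "positionOrder" = "3")).map (fun row => pvRowGet row "driverId"))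
  let poles := PySem.Dict.counter
    ((rows.filter (fun row => pvRowGet row "grid" = "1")).map (fun row => pvRowGet row "driverId"))
  (wins.items, podiums.items, poles.items)

-- ===== PRECONDITION & SPEC =====
-- Pre_ excludes exactly the inputs where Python A raises KeyError: a row without a
-- "driverId" key, or an active row without "positionOrder" or "grid".
def Pre_compute_career_stats_py (results : List (List (String × String))) (active_driver_ids : List String) : Prop :=
  ∀ row ∈ results, "driverId" ∈ row.map Prod.fst ∧
    (pvRowGet row "driverId" ∈ active_driver_ids →
      "positionOrder" ∈ row.map Prod.fst ∧ "grid" ∈ row.map Prod.fst)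
instance (results : List (List (String × String))) (active_driver_ids : List String) : Decidable (Pre_compute_career_stats_py results active_driver_ids) := by unfold Pre_compute_career_stats_py; infer_instance

def pvWitness_compute_career_stats_py : (List (List (String × String))) × List String :=
  ([[("driverId", "a"), ("positionOrder", "1"), ("grid", "2")]], ["a"])

def Spec_compute_career_stats_py (results : List (List (String × String))) (active_driver_ids : List String) (out : (List (String × Int)) × (List (String × Int)) × (List (String × Int))) : Prop := out = compute_career_stats_py_alt results active_driver_ids
instance (results : List (List (String × String))) (active_driver_ids : List String) (out : (List (String × Int)) × (List (String × Int)) × (List (String × Int))) : Decidable (Spec_compute_career_stats_py results active_driver_ids out) := by unfold Spec_compute_career_stats_py; infer_instance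

-- ===== CLAIM (what is proved, stated in full; the proofs are below) =====
def Claim_equal_compute_career_stats_py : Prop := ∀ (results : List (List (String × String))) (active_driver_ids : List String), Dom_compute_career_stats_py results active_driver_ids → Pre_compute_career_stats_py results active_driver_ids → Spec_compute_career_stats_py results active_driver_ids (compute_career_stats_py results active_driver_ids)

-- ===== LEMMAS AND PROOFS =====

-- the driverIds A bumps in each of the three counters, in row order
def pvWinsKeys (active : List String) (rs : List (List (String × String))) : List String :=
  ((rs.filter (fun row => pvRowGet row "driverId" ∈ active)).filter
      (fun row => pvRowGet row "positionOrder" = "1")).map (fun row => pvRowGet row "driverId")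
def pvPodiumKeys (active : List String) (rs : List (List (String × String))) : List String :=
  ((rs.filter (fun row => pvRowGet row "driverId" ∈ active)).filter
      (fun row => pvRowGet row "positionOrder" = "1" ∨ pvRowGet row "positionOrder" = "2" ∨ pvRowGet row "positionOrder" = "3")).map (fun row => pvRowGet row "driverId")
def pvPoleKeys (active : List String) (rs : List (List (String × String))) : List String :=
  ((rs.filter (fun row => pvRowGet row "driverId" ∈ active)).filter
      (fun row => pvRowGet row "grid" = "1")).map (fun row => pvRowGet row "driverId")

-- A's fold, componentwise, is counting over the corresponding key lists
lemma pvFoldA (active : List String) (rs : List (List (String × String)))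
    (w p g : PySem.Dict String Int) :
    rs.foldl
      (fun (st : PySem.Dict String Int × PySem.Dict String Int × PySem.Dict String Int) row =>
        let driver_id := pvRowGet row "driverId"
        if driver_id ∈ active then
          let wins := if pvRowGet row "positionOrder" = "1"
            then st.1.modify driver_id 0 (· + 1) else st.1
          let podiums := if pvRowGet row "positionOrder" = "1" ∨ pvRowGet row "positionOrder" = "2" ∨ pvRowGet row "positionOrder" = "3"
            then st.2.1.modify driver_id 0 (· + 1) else st.2.1
          let poles := if pvRowGet row "grid" = "1"
            then st.2.2.modify driver_id 0 (· + 1) else st.2.2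
          (wins, podiums, poles)
        else st)
      (w, p, g)
    = ((pvWinsKeys active rs).foldl (fun d x => d.modify x 0 (· + 1)) w,
       (pvPodiumKeys active rs).foldl (fun d x => d.modify x 0 (· + 1)) p,
       (pvPoleKeys active rs).foldl (fun d x => d.modify x 0 (· + 1)) g) := by
  induction rs generalizing w p g with
  | nil => simp [pvWinsKeys, pvPodiumKeys, pvPoleKeys]
  | cons r rs ih =>
    simp only [List.foldl_cons]
    by_cases hact : pvRowGet r "driverId" ∈ active
    · simp only [hact, if_pos, ih]
      by_cases h1 : pvRowGet r "positionOrder" = "1" <;>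
      by_cases h2 : pvRowGet r "positionOrder" = "1" ∨ pvRowGet r "positionOrder" = "2" ∨ pvRowGet r "positionOrder" = "3" <;>
      by_cases h3 : pvRowGet r "grid" = "1" <;>
        simp_all [pvWinsKeys, pvPodiumKeys, pvPoleKeys]
    · simp [hact, ih, pvWinsKeys, pvPodiumKeys, pvPoleKeys]

-- ===== VERDICT (by name: the statement is the Claim_ definition above) =====
theorem compute_career_stats_py_spec : Claim_equal_compute_career_stats_py := by
  intro results active _hdom _hpre
  unfold Spec_compute_career_stats_py compute_career_stats_py compute_career_stats_py_alt
  rw [pvFoldA]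
  simp [pvWinsKeys, pvPodiumKeys, pvPoleKeys, PySem.Dict.counter_eq_foldl]
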